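-- pv_equiv track=rewrite | github.com/carrizojuancruz/ai | app/agents/supervisor/memory/cold_path.py | _derive_nudge_metadata
-- ===== SOURCE A (Python) =====
-- from typing import Any
--
-- def _derive_nudge_metadata(category: str, summary: str, importance: int) -> dict[str, Any]:
--     metadata = {}
--     topic_key = "general"
--     summary_lower = summary.lower()
--
--     if category == "Finance":
--         if any(word in summary_lower for word in ["subscription", "recurring", "monthly", "annual"]):
--             topic_key = "subscription"
--         elif any(word in summary_lower for word in ["spending", "expense", "purchase"]):
--             topic_key = "spending_pattern"
--         elif any(word in summary_lower for word in ["bill", "payment", "due"]):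
--             topic_key = "bill"
--         else:
--             topic_key = "finance_general"
--     elif category == "Budget":
--         if any(word in summary_lower for word in ["budget", "limit", "allocation"]):
--             topic_key = "budget_status"
--         else:
--             topic_key = "budget_general"
--     elif category == "Goals":
--         if any(word in summary_lower for word in ["goal", "target", "achieve", "save", "saving"]):
--             topic_key = "goal_active"
--         elif any(word in summary_lower for word in ["milestone", "progress", "reached"]):
--             topic_key = "achievement"
--         else:
--             topic_key = "goals_general"
--     elif category == "Personal":
--         topic_key = "personal_info"
--     elif category == "Education":
--         topic_key = "education_interest"
--
--     metadata["topic_key"] = topic_key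
--
--     if importance >= 4:
--         metadata["importance_bin"] = "high"
--     elif importance >= 2:
--         metadata["importance_bin"] = "med"
--     else:
--         metadata["importance_bin"] = "low"
--
--     return metadata
-- ===== SOURCE B (Python) =====
-- # Branch-free classifier: exhaustively collect the ranks of ALL keywords present in the
-- # summary and reduce with min(); index tables arithmetically instead of if/elif chains.
-- _TABLES = {
--     "Finance": ({"subscription": 0, "recurring": 0, "monthly": 0, "annual": 0,
--                  "spending": 1, "expense": 1, "purchase": 1,
--                  "bill": 2, "payment": 2, "due": 2},
--                 ["subscription", "spending_pattern", "bill"], "finance_general"),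
--     "Budget": ({"budget": 0, "limit": 0, "allocation": 0},
--                ["budget_status"], "budget_general"),
--     "Goals": ({"goal": 0, "target": 0, "achieve": 0, "save": 0, "saving": 0,
--                "milestone": 1, "progress": 1, "reached": 1},
--               ["goal_active", "achievement"], "goals_general"),
--     "Personal": ({}, [], "personal_info"),
--     "Education": ({}, [], "education_interest"),
-- }
--
--
-- def _derive_nudge_metadata(category: str, summary: str, importance: int) -> dict:
--     ranks, topics, fallback = _TABLES.get(category, ({}, [], "general"))
--     text = summary.lower()
--     hits = [r for kw, r in ranks.items() if kw in text]
--     topic_key = (topics + [fallback])[min(hits, default=len(topics))]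
--     bin_index = (importance >= 2) + (importance >= 4)
--     return {"topic_key": topic_key, "importance_bin": ("low", "med", "high")[bin_index]}
-- ===== Notes on version B (the rewrite author's own statement) =====
-- stated objective: alternative
-- what changed: Replaced A's short-circuiting if/elif keyword cascades with a branch-free reduction: every keyword of the category is tested against the summary, the ranks of all matches are collected and min()-reduced to pick the topic, and the importance bin is computed by arithmetic indexing (importance>=2)+(importance>=4) instead of a threshold chain.
import Mathlib
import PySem

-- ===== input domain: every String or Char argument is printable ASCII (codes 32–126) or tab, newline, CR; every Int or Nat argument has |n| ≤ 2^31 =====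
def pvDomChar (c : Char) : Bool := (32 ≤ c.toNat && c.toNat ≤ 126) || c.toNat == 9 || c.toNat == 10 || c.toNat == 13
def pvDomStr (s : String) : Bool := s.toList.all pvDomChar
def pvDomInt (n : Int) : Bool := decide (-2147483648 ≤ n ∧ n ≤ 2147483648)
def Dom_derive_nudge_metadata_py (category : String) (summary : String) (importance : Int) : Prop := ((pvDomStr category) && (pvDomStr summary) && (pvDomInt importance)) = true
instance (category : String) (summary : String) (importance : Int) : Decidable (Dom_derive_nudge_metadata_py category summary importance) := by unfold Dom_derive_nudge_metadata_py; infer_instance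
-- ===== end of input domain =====

-- B replaces A's short-circuiting if/elif cascades by an exhaustive keyword scan reduced with min() and arithmetic table indexing (alternative, branch-free).
-- ===== PORT A =====
def derive_nudge_metadata_py (category : String) (summary : String) (importance : Int) : List (String × String) :=
  let metadata : PySem.Dict String String := PySem.Dict.empty
  let summary_lower := PySem.Str.lower summary
  let topic_key : String :=
    if category == "Finance" then
      if ["subscription", "recurring", "monthly", "annual"].any (fun w => PySem.Str.isIn w summary_lower) then
        "subscription"
      else if ["spending", "expense", "purchase"].any (fun w => PySem.Str.isIn w summary_lower) then
        "spending_pattern"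
      else if ["bill", "payment", "due"].any (fun w => PySem.Str.isIn w summary_lower) then
        "bill"
      else
        "finance_general"
    else if category == "Budget" then
      if ["budget", "limit", "allocation"].any (fun w => PySem.Str.isIn w summary_lower) then
        "budget_status"
      else
        "budget_general"
    else if category == "Goals" then
      if ["goal", "target", "achieve", "save", "saving"].any (fun w => PySem.Str.isIn w summary_lower) then
        "goal_active"
      else if ["milestone", "progress", "reached"].any (fun w => PySem.Str.isIn w summary_lower) then
        "achievement"
      else
        "goals_general"
    else if category == "Personal" then
      "personal_info"
    else if category == "Education" then
      "education_interest"
    else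
      "general"
  let metadata := metadata.insert "topic_key" topic_key
  let metadata :=
    if importance ≥ 4 then metadata.insert "importance_bin" "high"
    else if importance ≥ 2 then metadata.insert "importance_bin" "med"
    else metadata.insert "importance_bin" "low"
  metadata.items

-- ===== PORT B =====
-- the module-level _TABLES of Source B: category -> (keyword-rank dict, topics by rank, fallback)
def pvTables : PySem.Dict String (PySem.Dict String Nat × List String × String) :=
  PySem.Dict.ofList
    [("Finance", (PySem.Dict.ofList [("subscription", 0), ("recurring", 0), ("monthly", 0), ("annual", 0),
                    ("spending", 1), ("expense", 1), ("purchase", 1),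
                    ("bill", 2), ("payment", 2), ("due", 2)],
                  ["subscription", "spending_pattern", "bill"], "finance_general")),
     ("Budget", (PySem.Dict.ofList [("budget", 0), ("limit", 0), ("allocation", 0)],
                 ["budget_status"], "budget_general")),
     ("Goals", (PySem.Dict.ofList [("goal", 0), ("target", 0), ("achieve", 0), ("save", 0), ("saving", 0),
                  ("milestone", 1), ("progress", 1), ("reached", 1)],
                ["goal_active", "achievement"], "goals_general")),
     ("Personal", (PySem.Dict.empty, [], "personal_info")),
     ("Education", (PySem.Dict.empty, [], "education_interest"))]

def derive_nudge_metadata_py_alt (category : String) (summary : String) (importance : Int) : List (String × String) :=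
  let t := PySem.Dict.getD pvTables category (PySem.Dict.empty, [], "general")
  let text := PySem.Str.lower summary
  let hits := (t.1.items.filter (fun q => PySem.Str.isIn q.1 text)).map Prod.snd
  -- (topics + [fallback])[min(hits, default=len(topics))] — the index is always in range
  -- (every rank < len(topics), default = len(topics)), so List.getD is exact here
  let topic_key := (t.2.1 ++ [t.2.2]).getD ((PySem.List.min? hits (fun x => x)).getD t.2.1.length) ""
  -- (importance >= 2) + (importance >= 4) : bools add as ints
  let bin_index := (if importance ≥ 2 then 1 else 0) + (if importance ≥ 4 then 1 else 0)
  [("topic_key", topic_key), ("importance_bin", ["low", "med", "high"].getD bin_index "")]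

-- ===== PRECONDITION & SPEC =====
def Spec_derive_nudge_metadata_py (category : String) (summary : String) (importance : Int) (out : List (String × String)) : Prop := out = derive_nudge_metadata_py_alt category summary importance
instance (category : String) (summary : String) (importance : Int) (out : List (String × String)) : Decidable (Spec_derive_nudge_metadata_py category summary importance out) := by unfold Spec_derive_nudge_metadata_py; infer_instance

-- ===== CLAIM =====
def Claim_equal_derive_nudge_metadata_py : Prop := ∀ (category : String) (summary : String) (importance : Int), Dom_derive_nudge_metadata_py category summary importance → Spec_derive_nudge_metadata_py category summary importance (derive_nudge_metadata_py category summary importance)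

-- ===== LEMMAS AND PROOFS =====

-- every rank kept from filtering a constant-rank group is that rank
lemma pvAllSnd (G : List (String × Nat)) (r : Nat) (pred : String × Nat → Bool)
    (hG : ∀ q ∈ G, q.2 = r) : ∀ x ∈ (G.filter pred).map Prod.snd, x = r := by
  intro x hx
  simp only [List.mem_map, List.mem_filter] at hx
  obtain ⟨q, ⟨hq, _⟩, rfl⟩ := hx
  exact hG q hq

-- min-reduction of concatenated constant-rank hit lists = first nonempty group's rank, else default
lemma pvMinsel (l0 l1 l2 : List Nat) (d : Nat)
    (h0 : ∀ x ∈ l0, x = 0) (h1 : ∀ x ∈ l1, x = 1) (h2 : ∀ x ∈ l2, x = 2) :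
    (PySem.List.min? (l0 ++ (l1 ++ l2)) (fun x => x)).getD d =
      if l0 = [] then (if l1 = [] then (if l2 = [] then d else 2) else 1) else 0 := by
  by_cases e : l0 ++ (l1 ++ l2) = []
  · rcases List.append_eq_nil_iff.mp e with ⟨a, b⟩
    rcases List.append_eq_nil_iff.mp b with ⟨b1, b2⟩
    subst a b1 b2
    simp [PySem.List.min?]
  · obtain ⟨m, hm⟩ := Option.ne_none_iff_exists'.mp
      (fun hn => e ((PySem.List.min?_eq_none_iff (l0 ++ (l1 ++ l2)) (fun x : Nat => x)).mp hn))
    have hmem := PySem.List.min?_mem hm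
    have hmin := PySem.List.min?_isMin hm
    rw [hm]
    simp only [Option.getD_some]
    rcases List.eq_nil_or_concat' l0 with rfl | ⟨_, a, rfl⟩
    · rcases List.eq_nil_or_concat' l1 with rfl | ⟨_, b, rfl⟩
      · rcases List.eq_nil_or_concat' l2 with rfl | ⟨_, c, rfl⟩
        · simp at e
        · have : m = 2 := by
            rcases List.mem_append.mp hmem with h | h
            · simp at h
            · rcases List.mem_append.mp h with h | h
              · simp at h
              · exact h2 m h
          simp [this]
      · have hb : b = 1 := h1 b (by simp)
        have hle : m ≤ 1 := by
          have := hmin b (by simp)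
          simpa [hb] using this
        have hge : 1 ≤ m := by
          rcases List.mem_append.mp hmem with h | h
          · simp at h
          · rcases List.mem_append.mp h with h | h
            · have := h1 m h; omega
            · have := h2 m h; omega
        have : m = 1 := le_antisymm hle hge
        simp [this]
    · have ha : a = 0 := h0 a (by simp)
      have hle : m ≤ 0 := by
        have := hmin a (by simp)
        simpa [ha] using this
      have : m = 0 := Nat.le_zero.mp hle
      simp [this]

-- a constant-rank keyword group yields no hits iff no keyword occurs in the text
lemma pvNilIff (kws : List String) (r : Nat) (text : String) :
    (((kws.map (fun k => (k, r))).filter (fun q : String × Nat => PySem.Str.isIn q.1 text)).map Prod.snd = [])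
      ↔ (kws.any (fun w => PySem.Str.isIn w text)) = false := by
  simp [List.map_eq_nil_iff, List.filter_eq_nil_iff, List.any_eq_false]

-- the topic computations of the two ports agree for every category and summary text
lemma pvTopic (category text : String) :
    (if category == "Finance" then
      if ["subscription", "recurring", "monthly", "annual"].any (fun w => PySem.Str.isIn w text) then
        "subscription"
      else if ["spending", "expense", "purchase"].any (fun w => PySem.Str.isIn w text) then
        "spending_pattern"
      else if ["bill", "payment", "due"].any (fun w => PySem.Str.isIn w text) then
        "bill"
      else
        "finance_general"
    else if category == "Budget" then
      if ["budget", "limit", "allocation"].any (fun w => PySem.Str.isIn w text) then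
        "budget_status"
      else
        "budget_general"
    else if category == "Goals" then
      if ["goal", "target", "achieve", "save", "saving"].any (fun w => PySem.Str.isIn w text) then
        "goal_active"
      else if ["milestone", "progress", "reached"].any (fun w => PySem.Str.isIn w text) then
        "achievement"
      else
        "goals_general"
    else if category == "Personal" then
      "personal_info"
    else if category == "Education" then
      "education_interest"
    else
      "general")
    = ((PySem.Dict.getD pvTables category (PySem.Dict.empty, [], "general")).2.1
        ++ [(PySem.Dict.getD pvTables category (PySem.Dict.empty, [], "general")).2.2]).getD
        ((PySem.List.min?
            (((PySem.Dict.getD pvTables category (PySem.Dict.empty, [], "general")).1.items.filter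
                (fun q => PySem.Str.isIn q.1 text)).map Prod.snd) (fun x => x)).getD
          (PySem.Dict.getD pvTables category (PySem.Dict.empty, [], "general")).2.1.length) "" := by
  by_cases hFinance : category = "Finance"
  · subst hFinance
    rw [show PySem.Dict.getD pvTables "Finance" (PySem.Dict.empty, [], "general")
          = (PySem.Dict.ofList [("subscription", 0), ("recurring", 0), ("monthly", 0), ("annual", 0), ("spending", 1), ("expense", 1), ("purchase", 1), ("bill", 2), ("payment", 2), ("due", 2)],
             ["subscription", "spending_pattern", "bill"], "finance_general") from rfl]
    rw [show (PySem.Dict.ofList [("subscription", 0), ("recurring", 0), ("monthly", 0), ("annual", 0), ("spending", 1), ("expense", 1), ("purchase", 1), ("bill", 2), ("payment", 2), ("due", 2)] : PySem.Dict String Nat).items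
          = (["subscription", "recurring", "monthly", "annual"].map (fun k => (k, (0 : Nat)))) ++ ((["spending", "expense", "purchase"].map (fun k => (k, (1 : Nat)))) ++ (["bill", "payment", "due"].map (fun k => (k, (2 : Nat))))) from rfl]
    rw [List.filter_append, List.filter_append, List.map_append, List.map_append]
    rw [pvMinsel _ _ _ _
      (pvAllSnd _ _ _ (by simp)) (pvAllSnd _ _ _ (by simp)) (pvAllSnd _ _ _ (by simp))]
    simp only [show (("Finance" : String) == "Finance") = true from rfl, if_true]
    by_cases a0 : ["subscription", "recurring", "monthly", "annual"].any (fun w => PySem.Str.isIn w text) = true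
    · rw [if_pos a0, if_neg (fun h => absurd (a0.symm.trans ((pvNilIff _ _ _).mp h)) (by decide))]
      rfl
    · rw [if_neg a0, if_pos ((pvNilIff _ _ _).mpr (by simpa using a0))]
      by_cases a1 : ["spending", "expense", "purchase"].any (fun w => PySem.Str.isIn w text) = true
      · rw [if_pos a1, if_neg (fun h => absurd (a1.symm.trans ((pvNilIff _ _ _).mp h)) (by decide))]
        rfl
      · rw [if_neg a1, if_pos ((pvNilIff _ _ _).mpr (by simpa using a1))]
        by_cases a2 : ["bill", "payment", "due"].any (fun w => PySem.Str.isIn w text) = true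
        · rw [if_pos a2, if_neg (fun h => absurd (a2.symm.trans ((pvNilIff _ _ _).mp h)) (by decide))]
          rfl
        · rw [if_neg a2, if_pos ((pvNilIff _ _ _).mpr (by simpa using a2))]
          rfl
  by_cases hBudget : category = "Budget"
  · subst hBudget
    rw [show PySem.Dict.getD pvTables "Budget" (PySem.Dict.empty, [], "general")
          = (PySem.Dict.ofList [("budget", 0), ("limit", 0), ("allocation", 0)],
             ["budget_status"], "budget_general") from rfl]
    rw [show (PySem.Dict.ofList [("budget", 0), ("limit", 0), ("allocation", 0)] : PySem.Dict String Nat).items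
          = (["budget", "limit", "allocation"].map (fun k => (k, (0 : Nat)))) ++ (([] : List (String × Nat)) ++ ([] : List (String × Nat))) from rfl]
    rw [List.filter_append, List.filter_append, List.map_append, List.map_append]
    rw [pvMinsel _ _ _ _
      (pvAllSnd _ _ _ (by simp)) (pvAllSnd _ _ _ (by simp)) (pvAllSnd _ _ _ (by simp))]
    simp only [show (("Budget" : String) == "Finance") = false from rfl,
      show (("Budget" : String) == "Budget") = true from rfl, Bool.false_eq_true, if_false, if_true]
    by_cases a0 : ["budget", "limit", "allocation"].any (fun w => PySem.Str.isIn w text) = true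
    · rw [if_pos a0, if_neg (fun h => absurd (a0.symm.trans ((pvNilIff _ _ _).mp h)) (by decide))]
      rfl
    · rw [if_neg a0, if_pos ((pvNilIff _ _ _).mpr (by simpa using a0))]
      rfl
  by_cases hGoals : category = "Goals"
  · subst hGoals
    rw [show PySem.Dict.getD pvTables "Goals" (PySem.Dict.empty, [], "general")
          = (PySem.Dict.ofList [("goal", 0), ("target", 0), ("achieve", 0), ("save", 0), ("saving", 0), ("milestone", 1), ("progress", 1), ("reached", 1)],
             ["goal_active", "achievement"], "goals_general") from rfl]
    rw [show (PySem.Dict.ofList [("goal", 0), ("target", 0), ("achieve", 0), ("save", 0), ("saving", 0), ("milestone", 1), ("progress", 1), ("reached", 1)] : PySem.Dict String Nat).items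
          = (["goal", "target", "achieve", "save", "saving"].map (fun k => (k, (0 : Nat)))) ++ ((["milestone", "progress", "reached"].map (fun k => (k, (1 : Nat)))) ++ ([] : List (String × Nat))) from rfl]
    rw [List.filter_append, List.filter_append, List.map_append, List.map_append]
    rw [pvMinsel _ _ _ _
      (pvAllSnd _ _ _ (by simp)) (pvAllSnd _ _ _ (by simp)) (pvAllSnd _ _ _ (by simp))]
    simp only [show (("Goals" : String) == "Finance") = false from rfl,
      show (("Goals" : String) == "Budget") = false from rfl,
      show (("Goals" : String) == "Goals") = true from rfl, Bool.false_eq_true, if_false, if_true]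
    by_cases a0 : ["goal", "target", "achieve", "save", "saving"].any (fun w => PySem.Str.isIn w text) = true
    · rw [if_pos a0, if_neg (fun h => absurd (a0.symm.trans ((pvNilIff _ _ _).mp h)) (by decide))]
      rfl
    · rw [if_neg a0, if_pos ((pvNilIff _ _ _).mpr (by simpa using a0))]
      by_cases a1 : ["milestone", "progress", "reached"].any (fun w => PySem.Str.isIn w text) = true
      · rw [if_pos a1, if_neg (fun h => absurd (a1.symm.trans ((pvNilIff _ _ _).mp h)) (by decide))]
        rfl
      · rw [if_neg a1, if_pos ((pvNilIff _ _ _).mpr (by simpa using a1))]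
        rfl
  by_cases h4 : category = "Personal"
  · subst h4
    simp only [show (("Personal" : String) == "Finance") = false from rfl,
      show (("Personal" : String) == "Budget") = false from rfl,
      show (("Personal" : String) == "Goals") = false from rfl,
      show (("Personal" : String) == "Personal") = true from rfl, Bool.false_eq_true, if_false, if_true]
    rfl
  by_cases h5 : category = "Education"
  · subst h5
    simp only [show (("Education" : String) == "Finance") = false from rfl,
      show (("Education" : String) == "Budget") = false from rfl,
      show (("Education" : String) == "Goals") = false from rfl,
      show (("Education" : String) == "Personal") = false from rfl,
      show (("Education" : String) == "Education") = true from rfl, Bool.false_eq_true, if_false, if_true]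
    rfl
  rw [show PySem.Dict.getD pvTables category (PySem.Dict.empty, [], "general")
        = ((PySem.Dict.empty : PySem.Dict String Nat), ([] : List String), "general") by
      simp [pvTables, PySem.Dict.getD, PySem.Dict.get?, PySem.Dict.ofList, PySem.Dict.update,
        PySem.Dict.insert, PySem.Dict.empty, List.find?,
        beq_eq_false_iff_ne.mpr (Ne.symm hFinance), beq_eq_false_iff_ne.mpr (Ne.symm hBudget),
        beq_eq_false_iff_ne.mpr (Ne.symm hGoals), beq_eq_false_iff_ne.mpr (Ne.symm h4),
        beq_eq_false_iff_ne.mpr (Ne.symm h5)]]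
  simp only [beq_eq_false_iff_ne.mpr hFinance, beq_eq_false_iff_ne.mpr hBudget,
    beq_eq_false_iff_ne.mpr hGoals, beq_eq_false_iff_ne.mpr h4, beq_eq_false_iff_ne.mpr h5,
    Bool.false_eq_true, if_false]
  rfl

-- ===== VERDICT =====
theorem derive_nudge_metadata_py_spec : Claim_equal_derive_nudge_metadata_py := by
  intro category summary importance _
  unfold Spec_derive_nudge_metadata_py derive_nudge_metadata_py derive_nudge_metadata_py_alt
  simp only []
  rw [pvTopic category (PySem.Str.lower summary)]
  by_cases i4 : importance ≥ 4
  · have i2 : importance ≥ 2 := by omega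
    simp only [if_pos i4, if_pos i2]
    rfl
  · by_cases i2 : importance ≥ 2
    · simp only [if_neg i4, if_pos i2]
      rfl
    · simp only [if_neg i4, if_neg i2]
      rfl
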